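-- pv_equiv track=rewrite | github.com/jhnwsk/hackerrank | algorithms/implementation.py | count_sticks
-- ===== SOURCE A (Python) =====
-- def count_sticks(sticks):
--     """ Count the Sticks. """
--     result = []
--     while sticks:
--         result.append(len(sticks))
--         cut = min(sticks)
--         sticks = map(lambda x: x - cut, sticks)
--         sticks = [s for s in sticks if s > 0]
--
--     return result
-- ===== SOURCE B (Python) =====
-- def count_sticks(sticks):
--     """ Count the Sticks. """
--     result = []
--     prev = None
--     remaining = len(sticks)
--     for v in sorted(sticks):
--         if v != prev:
--             result.append(remaining)
--             prev = v
--         remaining -= 1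
--     return result
-- ===== Notes on version B (the rewrite author's own statement) =====
-- stated objective: faster
-- what changed: A repeatedly subtracts the minimum from every stick and filters out the exhausted ones (one full pass per distinct length); B sorts once and does a single scan over the sorted list, emitting the count of sticks remaining at each new distinct value.
import Mathlib
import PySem

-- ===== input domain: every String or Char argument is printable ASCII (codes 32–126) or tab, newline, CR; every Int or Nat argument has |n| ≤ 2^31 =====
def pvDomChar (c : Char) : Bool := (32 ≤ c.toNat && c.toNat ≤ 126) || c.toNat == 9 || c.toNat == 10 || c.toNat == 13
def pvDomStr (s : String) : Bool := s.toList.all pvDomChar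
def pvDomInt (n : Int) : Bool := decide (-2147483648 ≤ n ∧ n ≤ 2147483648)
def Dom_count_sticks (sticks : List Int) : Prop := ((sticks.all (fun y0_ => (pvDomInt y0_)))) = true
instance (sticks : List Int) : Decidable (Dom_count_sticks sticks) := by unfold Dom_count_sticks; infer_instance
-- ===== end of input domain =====

-- B replaces A's repeated subtract-min-and-filter rounds by one sort followed by a single scan
-- that emits the remaining-element count at each new distinct value (objective: faster).

-- ===== PORT A =====
-- while sticks: result.append(len(sticks)); cut = min(sticks); sticks = [x - cut for x in sticks if x - cut > 0]
-- (pv_lt_filter is cited by the port's decreasing_by: the filtered list is strictly shorter.)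
theorem pv_lt_filter (sticks : List Int) (hne : ¬ sticks = []) :
  (List.filter (fun x => decide (0 < x))
        (List.map (fun x => x - (PySem.List.min? sticks fun x => x).getD 0) sticks)).length <
    sticks.length := by
  have hm : PySem.List.min? sticks (fun x => x) = some ((PySem.List.min? sticks (fun x => x)).getD 0) := by
    cases hmin : PySem.List.min? sticks (fun x => x) with
    | none => exact absurd ((PySem.List.min?_eq_none_iff _ _).mp hmin) hne
    | some m => rfl
  have hmem : (PySem.List.min? sticks (fun x => x)).getD 0 ∈ sticks := PySem.List.min?_mem hm
  calc (List.filter (fun x => decide (0 < x)) (List.map (fun x => x - (PySem.List.min? sticks fun x => x).getD 0) sticks)).length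
      < (sticks.map (fun x => x - (PySem.List.min? sticks (fun x => x)).getD 0)).length := by
        apply List.length_filter_lt_length_iff_exists.mpr
        exact ⟨0, List.mem_map.mpr ⟨_, hmem, by ring⟩, by simp⟩
    _ = sticks.length := List.length_map ..

def count_sticks (sticks : List Int) : List Int :=
  if h : sticks = [] then []
  else
    let cut := (PySem.List.min? sticks (fun x => x)).getD 0
    (sticks.length : Int) ::
      count_sticks ((sticks.map (fun x => x - cut)).filter (fun x => decide (0 < x)))
termination_by sticks.length
decreasing_by simpa using pv_lt_filter sticks h

-- ===== PORT B =====
-- the loop body: for v in sorted(sticks): if v != prev: result.append(remaining); prev = v; remaining -= 1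
def csGo : List Int → Option Int → Int → List Int
  | [], _, _ => []
  | v :: t, prev, remaining =>
    if some v = prev then csGo t prev (remaining - 1)
    else remaining :: csGo t (some v) (remaining - 1)

def count_sticks_alt (sticks : List Int) : List Int :=
  csGo (PySem.List.sorted sticks (fun x => x) false) none (sticks.length : Int)

-- ===== PRECONDITION & SPEC =====
def Spec_count_sticks (sticks : List Int) (out : List Int) : Prop := out = count_sticks_alt sticks
instance (sticks : List Int) (out : List Int) : Decidable (Spec_count_sticks sticks out) := by unfold Spec_count_sticks; infer_instance

-- ===== CLAIM (what is proved, stated in full; the proofs are below) =====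
def Claim_equal_count_sticks : Prop := ∀ (sticks : List Int), Dom_count_sticks sticks → Spec_count_sticks sticks (count_sticks sticks)

-- ===== LEMMAS AND PROOFS =====

theorem csGo_map_sub (m : Int) : ∀ (s : List Int) (p : Option Int) (r : Int),
    csGo (s.map (fun x => x - m)) (p.map (fun x => x - m)) r = csGo s p r := by
  intro s
  induction s with
  | nil => intro p r; rfl
  | cons v t ih =>
    intro p r
    have hiff : (some (v - m) = p.map (fun x => x - m)) ↔ (some v = p) := by
      cases p with
      | none => simp
      | some q => simp [sub_left_inj]
    by_cases h : some v = p
    · simp only [List.map_cons, csGo, if_pos (hiff.mpr h), if_pos h]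
      exact ih p (r - 1)
    · simp only [List.map_cons, csGo, if_neg (fun hc => h (hiff.mp hc)), if_neg h]
      exact congrArg _ (ih (some v) (r - 1))

theorem csGo_skip (m : Int) : ∀ (s : List Int) (r : Int),
    s.Pairwise (· ≤ ·) → (∀ x ∈ s, m ≤ x) →
    csGo s (some m) r =
      csGo (s.filter (fun x => decide (m < x))) none (r - (s.countP (fun x => decide (x = m)) : Int)) := by
  intro s
  induction s with
  | nil => intro r _ _; rfl
  | cons v t ih =>
    intro r hp hge
    by_cases hv : v = m
    · subst hv
      have h1 : csGo (v :: t) (some v) r = csGo t (some v) (r - 1) := by simp [csGo]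
      rw [h1, ih (r - 1) hp.of_cons (fun x hx => hge x (List.mem_cons_of_mem _ hx))]
      have h2 : (v :: t).filter (fun x => decide (v < x)) = t.filter (fun x => decide (v < x)) := by
        simp
      rw [h2]
      congr 1
      simp
      ring
    · have hlt : m < v := lt_of_le_of_ne (hge v (List.mem_cons_self ..)) (Ne.symm hv)
      have hall : ∀ x ∈ t, m < x := fun x hx => lt_of_lt_of_le hlt (List.rel_of_pairwise_cons hp hx)
      have hf : t.filter (fun x => decide (m < x)) = t := List.filter_eq_self.mpr (fun x hx => by simpa using hall x hx)
      have hc : t.countP (fun x => decide (x = m)) = 0 := by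
        rw [List.countP_eq_zero]
        intro x hx
        simpa using ne_of_gt (hall x hx)
      have h1 : csGo (v :: t) (some m) r = r :: csGo t (some v) (r - 1) := by
        simp [csGo, hv]
      have h2 : (v :: t).filter (fun x => decide (m < x)) = v :: t := by
        simp [hlt, hf]
      rw [h1, h2]
      have h3 : ((v :: t).countP (fun x => decide (x = m)) : Int) = 0 := by
        simp [hv, hc]
      rw [h3, sub_zero]
      simp [csGo]

theorem main_eq : ∀ (n : Nat) (sticks : List Int), sticks.length ≤ n →
    count_sticks sticks = count_sticks_alt sticks := by
  intro n
  induction n with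
  | zero =>
    intro l hl
    have : l = [] := List.eq_nil_of_length_eq_zero (Nat.le_zero.mp hl)
    subst this
    rw [count_sticks]
    rfl
  | succ n ih =>
    intro l hl
    by_cases hne : l = []
    · subst hne
      rw [count_sticks]
      rfl
    · -- the minimum
      set m : Int := (PySem.List.min? l (fun x => x)).getD 0 with hmdef
      have hm : PySem.List.min? l (fun x => x) = some m := by
        cases hmin : PySem.List.min? l (fun x => x) with
        | none => exact absurd ((PySem.List.min?_eq_none_iff _ _).mp hmin) hne
        | some q => simp [hmdef, hmin]
      have hmem : m ∈ l := PySem.List.min?_mem hm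
      have hmin : ∀ x ∈ l, m ≤ x := PySem.List.min?_isMin hm
      -- the sorted list and its head
      set s : List Int := PySem.List.sorted l (fun x => x) false with hsdef
      have hperm : s.Perm l := PySem.List.sorted_perm ..
      have hpw : s.Pairwise (· ≤ ·) := PySem.List.sorted_pairwise ..
      have hsne : s ≠ [] := by
        intro hcon
        rw [hcon] at hperm
        exact hne hperm.symm.eq_nil
      obtain ⟨v₀, t, hst⟩ := List.exists_cons_of_ne_nil hsne
      have hv₀ : v₀ = m := by
        have h1 : ∀ y ∈ l, v₀ ≤ y := PySem.List.key_head_sorted_le l (fun x => x) (by rw [← hsdef]; exact hst)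
        have h2 : v₀ ∈ l := hperm.mem_iff.mp (by rw [hst]; exact List.mem_cons_self ..)
        exact le_antisymm (h1 m hmem) (hmin v₀ h2)
      -- the next round's list
      set l' : List Int := (l.map (fun x => x - m)).filter (fun x => decide (0 < x)) with hl'def
      have hpwt : t.Pairwise (· ≤ ·) := by
        have := hpw; rw [hst] at this; exact this.of_cons
      have hget : ∀ x ∈ t, m ≤ x := by
        intro x hx
        have := hpw; rw [hst, hv₀] at this
        exact List.rel_of_pairwise_cons this hx
      -- sorted l' = (t.filter (m < ·)).map (· - m)
      have hfilmap : (s.map (fun x => x - m)).filter (fun x => decide (0 < x))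
          = (s.filter (fun x => decide (m < x))).map (fun x => x - m) := by
        rw [List.filter_map]
        congr 1
        apply List.filter_congr
        intro x _
        simp only [Function.comp_apply, decide_eq_decide]
        omega
      have hsfil : s.filter (fun x => decide (m < x)) = t.filter (fun x => decide (m < x)) := by
        rw [hst, hv₀]
        simp
      have hcand : ((t.filter (fun x => decide (m < x))).map (fun x => x - m)).Pairwise (· ≤ ·) :=
        List.Pairwise.map _ (fun a b hab => by omega) (hpwt.filter _)
      have hperml' : ((t.filter (fun x => decide (m < x))).map (fun x => x - m)).Perm l' := by
        rw [← hsfil, ← hfilmap, hl'def]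
        exact (hperm.map _).filter _
      have hsorted' : PySem.List.sorted l' (fun x => x) false
          = (t.filter (fun x => decide (m < x))).map (fun x => x - m) := by
        rw [PySem.List.sorted_eq_sorted_of_perm _ _ _ (fun a b h => h) hperml'.symm]
        exact PySem.List.sorted_eq_self_of_pairwise _ _ hcand
      -- lengths
      have hlen : (l'.length : Int) = (l.length : Int) - 1 - (t.countP (fun x => decide (x = m)) : Int) := by
        have e1 : l'.length = l.countP (fun x => decide (m < x)) := by
          rw [hl'def, ← List.countP_eq_length_filter, List.countP_map]
          apply List.countP_congr
          intro x _
          simp only [Function.comp_apply, sub_pos]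
        have e2 : l.countP (fun x => decide (m < x)) = t.countP (fun x => decide (m < x)) := by
          rw [← hperm.countP_eq, hst, hv₀]
          simp
        have e3 : t.countP (fun x => decide (m < x)) + t.countP (fun x => decide (x = m)) = t.length := by
          have := List.length_eq_countP_add_countP (l := t) (p := fun x => decide (m < x))
          rw [this]
          congr 1
          apply List.countP_congr
          intro x hx
          have hmx := hget x hx
          constructor
          · intro h1; simp at h1 ⊢; omega
          · intro h1; simp at h1 ⊢; omega
        have e4 : l.length = t.length + 1 := by
          rw [← hperm.length_eq, hst]; simp
        have hle : t.countP (fun x => decide (x = m)) ≤ t.length := List.countP_le_length ..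
        rw [e1, e2]
        omega
      -- unfold A one step
      rw [count_sticks]
      simp only [hne, dite_false, ← hmdef, ← hl'def]
      -- unfold B one step
      have hB : count_sticks_alt l = (l.length : Int) :: count_sticks_alt l' := by
        rw [count_sticks_alt, ← hsdef, hst, hv₀]
        rw [count_sticks_alt, hsorted']
        rw [show (none : Option Int) = Option.map (fun x => x - m) none from rfl,
            csGo_map_sub m (t.filter (fun x => decide (m < x))) none]
        show csGo (m :: t) none _ = _
        rw [csGo, if_neg (by simp)]
        congr 1
        rw [csGo_skip m t _ hpwt hget, hlen]
      rw [hB]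
      congr 1
      apply ih
      have := pv_lt_filter l hne
      rw [← hmdef, ← hl'def] at this
      omega

-- ===== VERDICT (by name: the statement is the Claim_ definition above) =====
theorem count_sticks_spec : Claim_equal_count_sticks := by
  intro sticks _
  exact main_eq sticks.length sticks le_rfl
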